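-- pv_equiv track=rewrite | github.com/frontloss/GPU_Validation_Infrastructure | DisplayAutomation2.0/Libs/Core/display_utility.py | get_possible_configs
-- ===== SOURCE A (Python) =====
-- import itertools
--
-- def get_possible_configs(display_list, combination=False):
--     possible_list = {'enum.SINGLE': [],
--                      'enum.CLONE': [],
--                      'enum.EXTENDED': []
--                      }
--
--     display_permute_list = []
--     for i in range(1, len(display_list) + 1):
--         if combination:
--             permute_list = (itertools.combinations(display_list, i))
--         else:
--             permute_list = (itertools.permutations(display_list, i))
--         for new_config in permute_list:
--             display_permute_list.append(list(new_config))
--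
--     for displays in display_permute_list:
--         if len(displays) == 1:
--             possible_list["enum.SINGLE"].append(displays)
--         elif len(displays) > 1:
--             possible_list["enum.CLONE"].append(displays)
--             possible_list["enum.EXTENDED"].append(displays)
--
--     return possible_list
-- ===== SOURCE B (Python) =====
-- def _perms(xs, r):
--     # recursive: pick each index as the first element, recurse on the rest
--     if r == 0:
--         return [[]]
--     return [[xs[i]] + p
--             for i in range(len(xs))
--             for p in _perms(xs[:i] + xs[i + 1:], r - 1)]
--
--
-- def _combs(xs, r):
--     # recursive: either take the head or skip it
--     if r == 0:
--         return [[]]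
--     if not xs:
--         return []
--     return [[xs[0]] + c for c in _combs(xs[1:], r - 1)] + _combs(xs[1:], r)
--
--
-- def get_possible_configs(display_list, combination=False):
--     pick = _combs if combination else _perms
--     multi = [c for n in range(2, len(display_list) + 1)
--              for c in pick(display_list, n)]
--     return {'enum.SINGLE': [[d] for d in display_list],
--             'enum.CLONE': multi,
--             'enum.EXTENDED': list(multi)}
-- ===== Notes on version B (the rewrite author's own statement) =====
-- stated objective: alternative
-- what changed: B replaces the itertools calls and the flat-list-then-bucket passes with hand-written recursive generators (permutations by picking each index as first element, combinations by take-or-skip-the-head), builds SINGLE directly from the display list, and assembles the dict in one expression with the length>=2 configs shared by CLONE and EXTENDED.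
import Mathlib
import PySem

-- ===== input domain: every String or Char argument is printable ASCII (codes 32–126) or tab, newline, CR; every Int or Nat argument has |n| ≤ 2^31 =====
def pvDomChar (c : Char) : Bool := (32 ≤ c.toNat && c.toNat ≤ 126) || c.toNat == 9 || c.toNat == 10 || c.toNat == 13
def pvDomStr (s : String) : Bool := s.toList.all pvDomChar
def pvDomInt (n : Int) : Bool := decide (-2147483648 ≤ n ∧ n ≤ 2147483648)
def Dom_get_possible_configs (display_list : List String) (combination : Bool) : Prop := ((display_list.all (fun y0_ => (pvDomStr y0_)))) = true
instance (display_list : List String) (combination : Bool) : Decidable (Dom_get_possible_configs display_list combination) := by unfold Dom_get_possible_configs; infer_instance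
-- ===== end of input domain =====

-- B replaces the itertools calls and A's flat-list-plus-bucketing passes with hand-written
-- recursive generators and a direct one-expression assembly of the result dict (alternative).

-- ===== PORT A =====
def get_possible_configs (display_list : List String) (combination : Bool) : List (String × List (List String)) :=
  let possible_list : PySem.Dict String (List (List String)) :=
    PySem.Dict.mk [("enum.SINGLE", []), ("enum.CLONE", []), ("enum.EXTENDED", [])]
  let display_permute_list : List (List String) :=
    (PySem.List.pyRange 1 ((display_list.length : Int) + 1) 1).foldl (fun acc i =>
      let permute_list :=
        if combination then PySem.List.combinations display_list i.toNat
        else PySem.List.permutations display_list i.toNat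
      permute_list.foldl (fun acc2 new_config => acc2 ++ [new_config]) acc) []
  (display_permute_list.foldl (fun d displays =>
    if displays.length == 1 then
      PySem.Dict.modify d "enum.SINGLE" [] (fun l => l ++ [displays])
    else if displays.length > 1 then
      PySem.Dict.modify
        (PySem.Dict.modify d "enum.CLONE" [] (fun l => l ++ [displays]))
        "enum.EXTENDED" [] (fun l => l ++ [displays])
    else d) possible_list).items

-- ===== PORT B =====
-- _perms: pick each index as the first element, recurse on the rest.
-- xs[:i] + xs[i+1:] is List.eraseIdx; xs[i] for i < len xs is xs.getD i "" (exact there).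
def pvPermsB (xs : List String) : Nat → List (List String)
  | 0 => [[]]
  | r + 1 =>
      (List.range xs.length).flatMap (fun i =>
        (pvPermsB (xs.eraseIdx i) r).map (fun p => xs.getD i "" :: p))

-- _combs: either take the head or skip it
def pvCombsB : List String → Nat → List (List String)
  | _, 0 => [[]]
  | [], _ + 1 => []
  | x :: t, r + 1 => (pvCombsB t r).map (fun c => x :: c) ++ pvCombsB t (r + 1)

def get_possible_configs_alt (display_list : List String) (combination : Bool) : List (String × List (List String)) :=
  let multi : List (List String) :=
    (PySem.List.pyRange 2 ((display_list.length : Int) + 1) 1).flatMap (fun n =>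
      if combination then pvCombsB display_list n.toNat
      else pvPermsB display_list n.toNat)
  [("enum.SINGLE", display_list.map (fun d => [d])),
   ("enum.CLONE", multi),
   ("enum.EXTENDED", multi)]

-- ===== PRECONDITION & SPEC =====
def Spec_get_possible_configs (display_list : List String) (combination : Bool) (out : List (String × List (List String))) : Prop := out = get_possible_configs_alt display_list combination
instance (display_list : List String) (combination : Bool) (out : List (String × List (List String))) : Decidable (Spec_get_possible_configs display_list combination out) := by unfold Spec_get_possible_configs; infer_instance

-- ===== CLAIM (what is proved, stated in full; the proofs are below) =====
def Claim_equal_get_possible_configs : Prop := ∀ (display_list : List String) (combination : Bool), Dom_get_possible_configs display_list combination → Spec_get_possible_configs display_list combination (get_possible_configs display_list combination)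

-- ===== LEMMAS AND PROOFS =====

-- B's recursive permutation generator computes itertools.permutations
theorem pvPermsB_eq (xs : List String) (r : Nat) :
    pvPermsB xs r = PySem.List.permutations xs r := by
  induction r generalizing xs with
  | zero => simp [pvPermsB, PySem.List.permutations]
  | succ r ih =>
      rw [pvPermsB, PySem.List.permutations]
      apply List.flatMap_congr
      intro i hi
      have hlt : i < xs.length := List.mem_range.mp hi
      have : xs[i]? = some (xs.getD i "") := by
        rw [List.getElem?_eq_getElem hlt, List.getD_eq_getElem xs "" hlt]
      rw [this, ih]

-- B's recursive combination generator computes itertools.combinations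
theorem pvCombsB_eq (xs : List String) (r : Nat) :
    pvCombsB xs r = PySem.List.combinations xs r := by
  induction xs generalizing r with
  | nil =>
      cases r with
      | zero => simp [pvCombsB, PySem.List.combinations_zero]
      | succ r => simp [pvCombsB, PySem.List.combinations_nil_succ]
  | cons x t ih =>
      cases r with
      | zero => simp [pvCombsB, PySem.List.combinations_zero]
      | succ r => rw [pvCombsB, PySem.List.combinations_cons_succ, ih, ih]

-- permutations of length 1 are exactly the singletons, in order
theorem pv_permutations_one (xs : List String) :
    PySem.List.permutations xs 1 = xs.map (fun x => [x]) := by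
  simp only [PySem.List.permutations]
  induction xs with
  | nil => simp
  | cons a t ih =>
      simp only [List.length_cons, List.range_succ_eq_map, List.flatMap_cons, List.flatMap_map,
        List.getElem?_cons_zero, List.getElem?_cons_succ, List.map_cons]
      simpa using ih

-- A's bucketing fold over a three-key dict, characterised by two filters
theorem pv_bucket (l : List (List String)) (s c e : List (List String)) :
    (l.foldl (fun d displays =>
      if displays.length == 1 then
        PySem.Dict.modify d "enum.SINGLE" [] (fun l => l ++ [displays])
      else if displays.length > 1 then
        PySem.Dict.modify
          (PySem.Dict.modify d "enum.CLONE" [] (fun l => l ++ [displays]))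
          "enum.EXTENDED" [] (fun l => l ++ [displays])
      else d)
      (PySem.Dict.mk [("enum.SINGLE", s), ("enum.CLONE", c), ("enum.EXTENDED", e)])).items =
    [("enum.SINGLE", s ++ l.filter (fun d => d.length == 1)),
     ("enum.CLONE",  c ++ l.filter (fun d => decide (d.length > 1))),
     ("enum.EXTENDED", e ++ l.filter (fun d => decide (d.length > 1)))] := by
  induction l generalizing s c e with
  | nil => simp
  | cons x t ih =>
      by_cases h1 : x.length = 1
      · simp only [List.foldl_cons, h1, beq_self_eq_true, if_true]
        have hmod : PySem.Dict.modify
            (PySem.Dict.mk [("enum.SINGLE", s), ("enum.CLONE", c), ("enum.EXTENDED", e)])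
            "enum.SINGLE" [] (fun l => l ++ [x]) =
            PySem.Dict.mk [("enum.SINGLE", s ++ [x]), ("enum.CLONE", c), ("enum.EXTENDED", e)] := by
          simp [PySem.Dict.modify, PySem.Dict.get?, PySem.Dict.insert, PySem.Dict.getD,
            PySem.Dict.contains]
        rw [hmod, ih]
        simp [h1]
      · by_cases h2 : x.length > 1
        · have hb : (x.length == 1) = false := by simp [h1]
          simp only [List.foldl_cons, hb, Bool.false_eq_true, if_false, h2, if_true]
          have hmod : PySem.Dict.modify
              (PySem.Dict.modify
                (PySem.Dict.mk [("enum.SINGLE", s), ("enum.CLONE", c), ("enum.EXTENDED", e)])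
                "enum.CLONE" [] (fun l => l ++ [x]))
              "enum.EXTENDED" [] (fun l => l ++ [x]) =
              PySem.Dict.mk [("enum.SINGLE", s), ("enum.CLONE", c ++ [x]),
                ("enum.EXTENDED", e ++ [x])] := by
            simp [PySem.Dict.modify, PySem.Dict.get?, PySem.Dict.insert, PySem.Dict.getD,
              PySem.Dict.contains]
          rw [hmod, ih]
          simp [h1, h2]
        · have hb : (x.length == 1) = false := by simp [h1]
          simp only [List.foldl_cons, hb, Bool.false_eq_true, if_false, h2, if_false]
          rw [ih]
          simp [h1, h2]

-- every config drawn for a size i ≥ 2 has length ≥ 2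
theorem pv_multi_long (display_list : List String) (combination : Bool)
    (p : List String)
    (hp : p ∈ (PySem.List.pyRange 2 ((display_list.length : Int) + 1) 1).flatMap (fun n =>
      if combination then PySem.List.combinations display_list n.toNat
      else PySem.List.permutations display_list n.toNat)) : 2 ≤ p.length := by
  rcases List.mem_flatMap.mp hp with ⟨i, hi, hpi⟩
  have h2i : 2 ≤ i := (PySem.List.mem_pyRange_one.mp hi).1
  have hlen : p.length = i.toNat := by
    cases combination with
    | false => exact PySem.List.length_of_mem_permutations (by simpa using hpi)
    | true => exact PySem.List.length_of_mem_combinations (by simpa using hpi)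
  omega

-- ===== VERDICT (by name: the statement is the Claim_ definition above) =====
theorem get_possible_configs_spec : Claim_equal_get_possible_configs := by
  intro display_list combination _
  unfold Spec_get_possible_configs get_possible_configs get_possible_configs_alt
  have hB : ∀ (n : Int),
      (if combination then pvCombsB display_list n.toNat
       else pvPermsB display_list n.toNat) =
      (if combination then PySem.List.combinations display_list n.toNat
       else PySem.List.permutations display_list n.toNat) := by
    intro n; cases combination <;> simp [pvPermsB_eq, pvCombsB_eq]
  simp only [hB]
  -- flatten A's double append loop
  have hflat : ∀ (init : List (List String)),
      (PySem.List.pyRange 1 ((display_list.length : Int) + 1) 1).foldl (fun acc i =>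
        (if combination then PySem.List.combinations display_list i.toNat
         else PySem.List.permutations display_list i.toNat).foldl
          (fun acc2 new_config => acc2 ++ [new_config]) acc) init =
      init ++ (PySem.List.pyRange 1 ((display_list.length : Int) + 1) 1).flatMap (fun i =>
        if combination then PySem.List.combinations display_list i.toNat
        else PySem.List.permutations display_list i.toNat) := by
    intro init
    have := PySem.List.foldl_append_eq_flatMap
      (fun i => if combination then PySem.List.combinations display_list i.toNat
        else PySem.List.permutations display_list i.toNat)
      (PySem.List.pyRange 1 ((display_list.length : Int) + 1) 1) init
    rw [← this]
    apply PySem.List.foldl_congr_mem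
    intro acc i _
    simpa using PySem.List.foldl_append_eq_flatMap (fun c => [c])
      (if combination then PySem.List.combinations display_list i.toNat
       else PySem.List.permutations display_list i.toNat) acc
  simp only [hflat, List.nil_append]
  cases display_list with
  | nil =>
      cases combination <;> rfl
  | cons a t =>
      set dl := a :: t with hdl
      have hn : 1 ≤ (dl.length : Int) := by simp [hdl]
      have hsplit : PySem.List.pyRange 1 ((dl.length : Int) + 1) 1 =
          PySem.List.pyRange 1 2 1 ++ PySem.List.pyRange 2 ((dl.length : Int) + 1) 1 :=
        PySem.List.pyRange_one_append 1 2 ((dl.length : Int) + 1) (by norm_num) (by omega)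
      have hone : PySem.List.pyRange 1 2 1 = [(1 : Int)] := by
        have := PySem.List.pyRange_one_singleton (a := (1 : Int))
        norm_num at this ⊢
        exact this
      set M := (PySem.List.pyRange 2 ((dl.length : Int) + 1) 1).flatMap (fun i =>
        if combination then PySem.List.combinations dl i.toNat
        else PySem.List.permutations dl i.toNat) with hM
      have hpick1 : (if combination then PySem.List.combinations dl (1 : Int).toNat
          else PySem.List.permutations dl (1 : Int).toNat) = dl.map (fun x => [x]) := by
        cases combination with
        | false => simpa using pv_permutations_one dl
        | true => simpa using PySem.List.combinations_one dl
      rw [hsplit, hone, List.flatMap_append, List.flatMap_cons, List.flatMap_nil,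
        List.append_nil, hpick1, pv_bucket]
      have hfilt1 : (dl.map (fun x => [x])).filter (fun d => d.length == 1) =
          dl.map (fun x => [x]) := by
        apply List.filter_eq_self.mpr
        intro d hd
        rcases List.mem_map.mp hd with ⟨x, _, rfl⟩
        simp
      have hfilt2 : M.filter (fun d => d.length == 1) = [] := by
        apply List.filter_eq_nil_iff.mpr
        intro d hd
        have := pv_multi_long dl combination d (by simpa [hM] using hd)
        simp; omega
      have hfilt3 : (dl.map (fun x => [x])).filter (fun d => decide (d.length > 1)) = [] := by
        apply List.filter_eq_nil_iff.mpr
        intro d hd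
        rcases List.mem_map.mp hd with ⟨x, _, rfl⟩
        simp
      have hfilt4 : M.filter (fun d => decide (d.length > 1)) = M := by
        apply List.filter_eq_self.mpr
        intro d hd
        have := pv_multi_long dl combination d (by simpa [hM] using hd)
        simp; omega
      rw [List.filter_append, List.filter_append, hfilt1, hfilt2, hfilt3, hfilt4]
      simp
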